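-- pv_equiv track=rewrite | github.com/altonelli/interview-cake | problems/python/reverse_words.py | reverse_string_inplace
-- ===== SOURCE A (Python) =====
-- def reverse_string_inplace(string, start=None, end=None):
--     start = 0 if not start else start
--     end = len(string) - 1 if not end else end
--     string_list = list(string)
--     while start < end:
--         string_list[start], string_list[end] = string_list[end], string_list[start]
--         start += 1
--         end -= 1
--     return ''.join(string_list)
-- ===== SOURCE B (Python) =====
-- def reverse_string_inplace(string, start=None, end=None):
--     start = 0 if not start else start
--     end = len(string) - 1 if not end else end
--     return ''.join(string[start + end - i] if start <= i <= end else c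
--                    for i, c in enumerate(string))
-- ===== Notes on version B (the rewrite author's own statement) =====
-- stated objective: simpler
-- what changed: B replaces A's two-pointer in-place swap loop over a mutable list by a single forward pass that emits string[start+end-i] for indices inside [start,end] and the original character elsewhere, joined once.
-- outside the precondition, e.g. on reverse_string_inplace('abc', -2, 2): A returns 'abc', B returns 'acb'
import Mathlib
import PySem

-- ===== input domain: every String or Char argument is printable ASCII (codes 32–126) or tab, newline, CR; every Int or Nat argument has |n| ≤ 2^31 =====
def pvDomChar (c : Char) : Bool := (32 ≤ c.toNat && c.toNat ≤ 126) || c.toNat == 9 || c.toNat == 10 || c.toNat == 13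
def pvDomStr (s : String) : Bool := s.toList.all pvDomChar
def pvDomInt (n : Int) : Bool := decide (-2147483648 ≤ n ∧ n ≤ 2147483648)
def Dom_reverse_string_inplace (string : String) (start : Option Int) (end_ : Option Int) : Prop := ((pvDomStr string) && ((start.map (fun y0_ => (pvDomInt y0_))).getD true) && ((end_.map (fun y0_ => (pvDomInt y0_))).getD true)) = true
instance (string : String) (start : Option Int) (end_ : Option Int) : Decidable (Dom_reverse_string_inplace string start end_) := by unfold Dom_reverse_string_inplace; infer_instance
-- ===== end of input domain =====

-- B replaces A's two-pointer swap loop by a single forward index-mapping pass (simpler decomposition, same cost).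

-- ===== PORT A =====
-- A's while loop: swap string_list[start]/string_list[end], start += 1, end -= 1, while start < end.
-- pyGetD/pySetD are the total forms of Python list indexing; inside Pre_ every index the loop touches is in range.
def pvRevLoop (l : List Char) (s e : Int) : List Char :=
  if s < e then
    pvRevLoop
      (PySem.List.pySetD (PySem.List.pySetD l s (PySem.List.pyGetD l e ' ')) e
        (PySem.List.pyGetD l s ' '))
      (s + 1) (e - 1)
  else l
termination_by (e - s).toNat
decreasing_by omega

def reverse_string_inplace (string : String) (start : Option Int) (end_ : Option Int) : String :=
  let s : Int := match start with | none => 0 | some v => if v = 0 then 0 else v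
  let e : Int := match end_ with
    | none => PySem.Str.len string - 1
    | some v => if v = 0 then PySem.Str.len string - 1 else v
  String.ofList (pvRevLoop string.toList s e)

-- ===== PORT B =====
-- B: one forward pass over enumerate(string): emit string[start+end-i] when start <= i <= end, else the
-- original character. pyGetD's default (the untouched character) is only reached outside Pre_, where B's Python raises.
def reverse_string_inplace_alt (string : String) (start : Option Int) (end_ : Option Int) : String :=
  let s : Int := match start with | none => 0 | some v => if v = 0 then 0 else v
  let e : Int := match end_ with
    | none => PySem.Str.len string - 1
    | some v => if v = 0 then PySem.Str.len string - 1 else v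
  let chars := string.toList
  String.ofList ((PySem.List.enumerate chars 0).map (fun ic =>
    if s ≤ ic.1 ∧ ic.1 ≤ e then PySem.List.pyGetD chars (s + e - ic.1) ic.2 else ic.2))

-- ===== PRECONDITION & SPEC =====
-- Pre_ excludes inputs whose effective swap range (after A's falsy-default guards) is nonempty yet reaches
-- outside [0, len(string)): there A either raises IndexError or, for in-range negative indices, returns an
-- accidental partial-swap value produced by Python's negative-index wraparound.
def Pre_reverse_string_inplace (string : String) (start : Option Int) (end_ : Option Int) : Prop :=
  let s : Int := match start with | none => 0 | some v => if v = 0 then 0 else v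
  let e : Int := match end_ with
    | none => PySem.Str.len string - 1
    | some v => if v = 0 then PySem.Str.len string - 1 else v
  s < e → (0 ≤ s ∧ e < PySem.Str.len string)
instance (string : String) (start : Option Int) (end_ : Option Int) : Decidable (Pre_reverse_string_inplace string start end_) := by unfold Pre_reverse_string_inplace; infer_instance

def pvWitness_reverse_string_inplace : String × Option Int × Option Int := ("hello", none, none)

def Spec_reverse_string_inplace (string : String) (start : Option Int) (end_ : Option Int) (out : String) : Prop := out = reverse_string_inplace_alt string start end_
instance (string : String) (start : Option Int) (end_ : Option Int) (out : String) : Decidable (Spec_reverse_string_inplace string start end_ out) := by unfold Spec_reverse_string_inplace; infer_instance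

-- ===== CLAIM (what is proved, stated in full; the proofs are below) =====
def Claim_equal_reverse_string_inplace : Prop := ∀ (string : String) (start : Option Int) (end_ : Option Int), Dom_reverse_string_inplace string start end_ → Pre_reverse_string_inplace string start end_ → Spec_reverse_string_inplace string start end_ (reverse_string_inplace string start end_)

-- ===== LEMMAS AND PROOFS =====

-- Pointwise characterisation of A's swap loop under in-range bounds.
theorem pvRevLoop_getElem? (l : List Char) (s e : Int) (h0 : 0 ≤ s) (he : e < (l.length : Int))
    (j : Nat) :
    (pvRevLoop l s e)[j]? =
      if s ≤ (j : Int) ∧ (j : Int) ≤ e then l[(s + e - (j : Int)).toNat]? else l[j]? := by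
  by_cases hlt : s < e
  · rw [pvRevLoop, if_pos hlt]
    have h0e : 0 ≤ e := by omega
    have hslen : s < (l.length : Int) := by omega
    set l' := PySem.List.pySetD (PySem.List.pySetD l s (PySem.List.pyGetD l e ' ')) e
        (PySem.List.pyGetD l s ' ') with hl'
    have hlen' : l'.length = l.length := by
      simp [hl', PySem.List.length_pySetD]
    have ih := pvRevLoop_getElem? l' (s + 1) (e - 1) (by omega)
      (by rw [hlen']; omega) j
    rw [ih]
    have hsl : s.toNat < l.length := by omega
    have hel : e.toNat < l.length := by omega
    have hset : l' = (l.set s.toNat l[e.toNat]).set e.toNat l[s.toNat] := by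
      rw [hl', PySem.List.pyGetD_eq_getElem l ' ' h0e he, PySem.List.pyGetD_eq_getElem l ' ' h0 hslen,
          PySem.List.pySetD_of_nonneg _ _ h0, PySem.List.pySetD_of_nonneg _ _ h0e]
    have hget : ∀ k : Nat, l'[k]? =
        if (k : Int) = e then l[s.toNat]? else if (k : Int) = s then l[e.toNat]? else l[k]? := by
      intro k
      rw [hset, List.getElem?_set, List.getElem?_set]
      by_cases hke : (k : Int) = e
      · rw [if_pos (by omega : e.toNat = k), if_pos hke,
          if_pos (by simp [List.length_set]; omega), List.getElem?_eq_getElem hsl]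
      · rw [if_neg (by omega : ¬ e.toNat = k), if_neg hke]
        by_cases hks : (k : Int) = s
        · rw [if_pos (by omega : s.toNat = k), if_pos hks, if_pos (by omega),
            List.getElem?_eq_getElem hel]
        · rw [if_neg (by omega : ¬ s.toNat = k), if_neg hks]
    by_cases h1 : s + 1 ≤ (j : Int) ∧ (j : Int) ≤ e - 1
    · rw [if_pos h1, if_pos (by omega : s ≤ (j:Int) ∧ (j:Int) ≤ e), hget]
      have hc2 : (s + 1 + (e - 1) - (j : Int)).toNat = (s + e - (j : Int)).toNat := by omega
      rw [if_neg (by omega), if_neg (by omega), hc2]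
    · by_cases h2 : s ≤ (j : Int) ∧ (j : Int) ≤ e
      · rw [if_neg h1, if_pos h2, hget]
        by_cases hje : (j : Int) = e
        · rw [if_pos hje, show (s + e - (j : Int)).toNat = s.toNat from by omega]
        · rw [if_neg hje, if_pos (by omega : (j:Int) = s),
            show (s + e - (j : Int)).toNat = e.toNat from by omega]
      · rw [if_neg h1, if_neg h2, hget, if_neg (by omega), if_neg (by omega)]
  · rw [pvRevLoop, if_neg hlt]
    by_cases hc : s ≤ (j : Int) ∧ (j : Int) ≤ e
    · rw [if_pos hc, show (s + e - (j : Int)).toNat = j from by omega]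
    · rw [if_neg hc]
termination_by (e - s).toNat
decreasing_by omega

-- Pointwise value of B's enumerate-map pass.
theorem enumMap_getElem? (f : Int × Char → Char) (l : List Char) (k : Int) (j : Nat) :
    ((PySem.List.enumerate l k).map f)[j]? = l[j]?.map (fun c => f (k + (j : Int), c)) := by
  induction l generalizing k j with
  | nil => simp [PySem.List.enumerate_nil]
  | cons x xs ih =>
    cases j with
    | zero => simp [PySem.List.enumerate_cons]
    | succ j =>
      rw [PySem.List.enumerate_cons, List.map_cons, List.getElem?_cons_succ,
        List.getElem?_cons_succ, ih (k + 1) j]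
      simp only [show k + 1 + (j : Int) = k + ((j : Nat) + 1 : Nat) from by push_cast; ring]

-- The list-level equivalence of the two passes.
theorem pvCore (l : List Char) (s e : Int) (hp : s < e → 0 ≤ s ∧ e < (l.length : Int)) :
    pvRevLoop l s e = (PySem.List.enumerate l 0).map (fun ic =>
      if s ≤ ic.1 ∧ ic.1 ≤ e then PySem.List.pyGetD l (s + e - ic.1) ic.2 else ic.2) := by
  apply List.ext_getElem?
  intro j
  rw [enumMap_getElem?]
  simp only [zero_add]
  by_cases hlt : s < e
  · obtain ⟨h0, he⟩ := hp hlt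
    rw [pvRevLoop_getElem? l s e h0 he j]
    by_cases hc : s ≤ (j : Int) ∧ (j : Int) ≤ e
    · rw [if_pos hc]
      have hjl : j < l.length := by omega
      rw [List.getElem?_eq_getElem hjl, Option.map_some, if_pos hc,
        PySem.List.pyGetD_eq_getElem l _ (by omega) (by omega),
        List.getElem?_eq_getElem (by omega : (s + e - (j:Int)).toNat < l.length)]
    · rw [if_neg hc]
      cases hj : l[j]? with
      | none => simp
      | some c => rw [Option.map_some, if_neg hc]
  · rw [pvRevLoop, if_neg hlt]
    cases hj : l[j]? with
    | none => simp
    | some c =>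
      rw [Option.map_some]
      by_cases hc : s ≤ (j : Int) ∧ (j : Int) ≤ e
      · have hjl : j < l.length := List.getElem?_eq_some_iff.mp hj |>.1
        rw [if_pos hc, show s + e - (j : Int) = (j : Int) from by omega,
          PySem.List.pyGetD_eq_getElem l c (by omega) (by omega)]
        have := List.getElem?_eq_some_iff.mp hj |>.2
        simp only [Int.toNat_natCast]
        exact this.symm ▸ rfl
      · rw [if_neg hc]

-- ===== VERDICT (by name: the statement is the Claim_ definition above) =====
theorem reverse_string_inplace_spec : Claim_equal_reverse_string_inplace := by
  intro string start end_ _hdom hpre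
  unfold Pre_reverse_string_inplace at hpre
  unfold Spec_reverse_string_inplace reverse_string_inplace reverse_string_inplace_alt
  simp only [PySem.Str.len_eq] at hpre ⊢
  exact congrArg String.ofList (pvCore string.toList _ _ hpre)
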